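-- pv_equiv track=rewrite | github.com/khx0/numpy-filter | src/filter_sequential_duplicates.py | get_multiplicity
-- ===== SOURCE A (Python) =====
-- def get_multiplicity(X):
--     '''
--     multiplicity is a list of tuples.
--     Each tuple has the format (index, multiplicity),
--     where only multiple records, i.e. multiplicity >= 2 are recorded
--     Non-multiple entries do not create a record in the multiplicity list.
--     '''
--
--     # initialization
--     multiplicity = []
--     reading = False
--     start = None
--     mult = None
--     cc = 1 # start with second array element
--
--     if len(X) <= 1: # corner case
--         return []
--
--     while cc < len(X):
--         if (X[cc] == X[cc - 1]) and (reading == False):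
--             reading = True
--             start = cc - 1  # set start index
--             mult = 2        # minimal multiplicity is 2
--         elif (X[cc] == X[cc - 1]) and (reading == True):
--             mult += 1       # continue current token reading
--         elif (X[cc] != X[cc - 1]) and (reading == True):
--             reading = False # stop current token reading
--             record = (start, mult)
--             mult = None
--             multiplicity.append(record)
--         cc += 1
--
--     # cover end corner cases
--     if mult:
--         record = (start, mult)
--         multiplicity.append(record)
--
--     return multiplicity
-- ===== SOURCE B (Python) =====
-- def get_multiplicity(X):
--     """Run-length scan with two indices: for each maximal run of equal
--     consecutive elements, record (start, length) when length >= 2."""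
--     multiplicity = []
--     i = 0
--     n = len(X)
--     while i < n:
--         j = i + 1
--         while j < n and X[j] == X[i]:
--             j += 1
--         if j - i >= 2:
--             multiplicity.append((i, j - i))
--         i = j
--     return multiplicity
-- ===== Notes on version B (the rewrite author's own statement) =====
-- stated objective: simpler
-- what changed: Replaced the reading-flag state machine with Option state and end-of-loop patch-up by a two-index run-length scan that finds each maximal run of equal elements and records it directly when its length is at least 2.
import Mathlib
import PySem

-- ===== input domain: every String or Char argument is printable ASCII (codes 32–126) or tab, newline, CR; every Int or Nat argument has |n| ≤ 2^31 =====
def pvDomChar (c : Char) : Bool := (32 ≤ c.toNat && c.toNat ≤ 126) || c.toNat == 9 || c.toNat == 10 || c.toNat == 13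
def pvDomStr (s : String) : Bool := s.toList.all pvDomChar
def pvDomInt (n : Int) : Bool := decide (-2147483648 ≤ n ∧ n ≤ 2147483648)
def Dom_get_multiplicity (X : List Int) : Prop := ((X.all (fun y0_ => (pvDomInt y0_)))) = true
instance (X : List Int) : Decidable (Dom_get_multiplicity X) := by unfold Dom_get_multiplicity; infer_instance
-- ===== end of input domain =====

-- B replaces A's reading-flag state machine by a direct maximal-run scan (objective: simpler); same return value.

-- ===== PORT A =====
-- A's while loop: state (multiplicity=acc, reading, start, mult, cc); the list argument is
-- X[cc:], prev is X[cc-1].  The final `if mult:` is the Python truthiness of an Option Int.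
def aGo (acc : List (Int × Int)) (reading : Bool) (start mult : Option Int)
    (cc prev : Int) : List Int → List (Int × Int)
  | [] =>
      match mult with
      | some m => if m ≠ 0 then acc ++ [(start.getD 0, m)] else acc
      | none => acc
  | x :: rest =>
      if x == prev then
        if !reading then
          aGo acc true (some (cc - 1)) (some 2) (cc + 1) x rest
        else
          aGo acc true start (mult.map (· + 1)) (cc + 1) x rest
      else
        if reading then
          aGo (acc ++ [(start.getD 0, mult.getD 0)]) false start none (cc + 1) x rest
        else
          aGo acc reading start mult (cc + 1) x rest

def get_multiplicity (X : List Int) : List (Int × Int) :=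
  if X.length ≤ 1 then []
  else
    match X with
    | [] => []
    | x :: xs => aGo [] false none none 1 x xs

-- ===== PORT B =====
-- B's outer while loop: at absolute index i with remaining suffix x :: xs, the inner
-- while loop advances j over the equal prefix (takeWhile), giving run length k+1.
def altGo (i : Int) : List Int → List (Int × Int)
  | [] => []
  | x :: xs =>
      let k := (xs.takeWhile (fun y => y == x)).length
      (if (k : Int) + 1 ≥ 2 then [(i, (k : Int) + 1)] else []) ++
        altGo (i + ((k : Int) + 1)) (xs.drop k)
  termination_by l => l.length
  decreasing_by simp

def get_multiplicity_alt (X : List Int) : List (Int × Int) := altGo 0 X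

-- ===== PRECONDITION & SPEC =====
def Spec_get_multiplicity (X : List Int) (out : List (Int × Int)) : Prop := out = get_multiplicity_alt X
instance (X : List Int) (out : List (Int × Int)) : Decidable (Spec_get_multiplicity X out) := by unfold Spec_get_multiplicity; infer_instance

-- ===== CLAIM (what is proved, stated in full; the proofs are below) =====
def Claim_equal_get_multiplicity : Prop := ∀ (X : List Int), Dom_get_multiplicity X → Spec_get_multiplicity X (get_multiplicity X)

-- ===== LEMMAS AND PROOFS =====

theorem altGo_nil (i : Int) : altGo i [] = [] := by unfold altGo; rfl

theorem altGo_cons (i : Int) (x : Int) (xs : List Int) :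
    altGo i (x :: xs) =
      (if ((xs.takeWhile (fun y => y == x)).length : Int) + 1 ≥ 2 then
        [(i, ((xs.takeWhile (fun y => y == x)).length : Int) + 1)] else []) ++
      altGo (i + (((xs.takeWhile (fun y => y == x)).length : Int) + 1))
        (xs.drop (xs.takeWhile (fun y => y == x)).length) := by
  conv_lhs => unfold altGo

-- The joint loop invariant, by strong induction on the suffix length:
-- (L1) in the non-reading state with mult = none, A's loop from prev = X[cc-1]
--      computes acc ++ B's scan of the suffix starting at index cc-1;
-- (L2) in the reading state (start s, count m > 0, current element z), A finishes the
--      run of z's, emits (s, m + k), and proceeds as B does after that run.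
theorem main_inv (n : Nat) : ∀ (xs : List Int), xs.length ≤ n →
    ((∀ (x cc : Int) (acc : List (Int × Int)) (st : Option Int),
        aGo acc false st none cc x xs = acc ++ altGo (cc - 1) (x :: xs)) ∧
     (∀ (z cc s m : Int) (acc : List (Int × Int)), 0 < m →
        aGo acc true (some s) (some m) cc z xs =
          (acc ++ [(s, m + ((xs.takeWhile (fun y => y == z)).length : Int))]) ++
            altGo (cc + ((xs.takeWhile (fun y => y == z)).length : Int))
              (xs.drop (xs.takeWhile (fun y => y == z)).length)))
  := by
  induction n with
  | zero =>
    intro xs hlen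
    have hxs : xs = [] := List.eq_nil_of_length_eq_zero (Nat.le_zero.mp hlen)
    subst hxs
    constructor
    · intro x cc acc st
      simp [aGo, altGo_cons, altGo_nil]
    · intro z cc s m acc hm
      simp [aGo, altGo_nil]
      omega
  | succ n ih =>
    intro xs hlen
    match xs with
    | [] =>
      constructor
      · intro x cc acc st
        simp [aGo, altGo_cons, altGo_nil]
      · intro z cc s m acc hm
        simp [aGo, altGo_nil]
        omega
    | z :: zs =>
      have hzs : zs.length ≤ n := by simpa using Nat.succ_le_succ_iff.mp hlen
      constructor
      · -- L1
        intro x cc acc st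
        rw [aGo]
        by_cases hzx : z = x
        · subst hzx
          simp only [beq_self_eq_true, if_true, Bool.not_false]
          rw [(ih zs hzs).2 z (cc + 1) (cc - 1) 2 acc (by norm_num)]
          rw [altGo_cons]
          have htw : (z :: zs).takeWhile (fun y => y == z) =
              z :: zs.takeWhile (fun y => y == z) := by
            simp [List.takeWhile]
          simp only [htw, List.length_cons, List.drop_succ_cons]
          set k : Int := ((zs.takeWhile (fun y => y == z)).length : Int) with hk
          have h2 : ((((zs.takeWhile (fun y => y == z)).length + 1 : Nat)) : Int) + 1 ≥ 2 := by
            push_cast; omega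
          rw [if_pos h2]
          push_cast
          have e1 : (2 : Int) + k = k + 1 + 1 := by ring
          have e2 : cc + 1 + k = cc - 1 + (k + 1 + 1) := by ring
          rw [List.append_assoc, e1, e2]
        · have hne : (z == x) = false := by simp [hzx]
          simp only [hne, Bool.false_eq_true, if_false, Bool.not_false]
          rw [(ih zs hzs).1 z (cc + 1) acc st]
          rw [altGo_cons (cc - 1) x (z :: zs)]
          have htw : (z :: zs).takeWhile (fun y => y == x) = [] := by
            simp [List.takeWhile, hne]
          simp only [htw, List.length_nil, List.drop_zero]
          norm_num
      · -- L2
        intro w cc s m acc hm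
        rw [aGo]
        by_cases hzw : z = w
        · subst hzw
          simp only [beq_self_eq_true, if_true, Bool.not_true, Bool.false_eq_true, if_false]
          rw [show (some m).map (· + 1) = some (m + 1) from rfl]
          rw [(ih zs hzs).2 z (cc + 1) s (m + 1) acc (by omega)]
          have htw : (z :: zs).takeWhile (fun y => y == z) =
              z :: zs.takeWhile (fun y => y == z) := by
            simp [List.takeWhile]
          simp only [htw, List.length_cons, List.drop_succ_cons]
          set k : Int := ((zs.takeWhile (fun y => y == z)).length : Int) with hk
          push_cast
          have e1 : m + 1 + k = m + (k + 1) := by ring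
          have e2 : cc + 1 + k = cc + (k + 1) := by ring
          rw [e1, e2]
        · have hne : (z == w) = false := by simp [hzw]
          simp only [hne, Bool.false_eq_true, if_false, if_true]
          rw [show (some s).getD 0 = s from rfl, show (some m).getD 0 = m from rfl]
          rw [(ih zs hzs).1 z (cc + 1) (acc ++ [(s, m)]) (some s)]
          have htw : (z :: zs).takeWhile (fun y => y == w) = [] := by
            simp [List.takeWhile, hne]
          simp only [htw, List.length_nil, List.drop_zero]
          norm_num

-- ===== VERDICT (by name: the statement is the Claim_ definition above) =====
theorem get_multiplicity_spec : Claim_equal_get_multiplicity := by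
  intro X _
  unfold Spec_get_multiplicity get_multiplicity get_multiplicity_alt
  match X with
  | [] => simp [altGo_nil]
  | [x] => simp [altGo_cons, altGo_nil]
  | x :: y :: ys =>
    have h : ¬ (x :: y :: ys).length ≤ 1 := by simp
    rw [if_neg h]
    have := (main_inv (y :: ys).length (y :: ys) le_rfl).1 x 1 [] none
    simpa using this
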